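-- pv_equiv track=rewrite | github.com/manvithachingtha/-Implement-a-digital-signal-generator2 | Extra.py | encode_nrz_i
-- ===== SOURCE A (Python) =====
-- def encode_nrz_i(data):
--     signal = []
--     last = -1
--     for bit in data:
--         if bit == '1':
--             last *= -1
--         signal.append(last)
--     return signal
-- ===== SOURCE B (Python) =====
-- def encode_nrz_i(data):
--     # prefix-aggregate then map: cumulative count of '1's, level = sign of parity
--     counts = []
--     c = 0
--     for bit in data:
--         c += bit == '1'
--         counts.append(c)
--     return [1 if c % 2 else -1 for c in counts]
-- ===== Notes on version B (the rewrite author's own statement) =====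
-- stated objective: alternative
-- what changed: Replaces the mutate-last-and-append loop with a prefix-aggregate pipeline: one scan builds the cumulative ones-count sequence, then each level is derived from that aggregate's parity (odd -> 1, even -> -1).
import Mathlib
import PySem

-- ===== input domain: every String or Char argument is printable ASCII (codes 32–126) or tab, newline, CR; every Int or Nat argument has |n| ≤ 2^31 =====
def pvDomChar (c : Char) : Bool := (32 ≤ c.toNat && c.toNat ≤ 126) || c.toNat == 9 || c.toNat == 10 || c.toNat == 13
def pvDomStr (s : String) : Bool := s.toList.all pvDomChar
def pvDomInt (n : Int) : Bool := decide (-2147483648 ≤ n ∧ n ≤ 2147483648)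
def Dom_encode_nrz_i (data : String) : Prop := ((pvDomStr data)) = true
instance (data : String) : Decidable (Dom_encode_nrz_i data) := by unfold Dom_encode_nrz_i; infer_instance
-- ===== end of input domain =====

-- B replaces A's mutate-last-and-append loop with a prefix ones-count scan followed by a parity-to-level map (alternative decomposition, same cost).


-- ===== PORT A =====
-- for bit in data: if bit == '1': last *= -1; signal.append(last)
def encode_nrz_i (data : String) : List Int :=
  (data.toList.foldl
    (fun (st : List Int × Int) bit =>
      let last := if bit = '1' then st.2 * (-1) else st.2
      (st.1 ++ [last], last))
    ([], -1)).1

-- ===== PORT B =====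
-- cumulative ones-count sequence (first loop of Source B)
def pvPrefixCounts : List Char → Int → List Int
  | [], _ => []
  | bit :: rest, c =>
      let c' := c + (if bit = '1' then 1 else 0)
      c' :: pvPrefixCounts rest c'

def encode_nrz_i_alt (data : String) : List Int :=
  (pvPrefixCounts data.toList 0).map (fun c => if c % 2 = 1 then 1 else -1)

-- ===== PRECONDITION & SPEC =====
def Spec_encode_nrz_i (data : String) (out : List Int) : Prop := out = encode_nrz_i_alt data
instance (data : String) (out : List Int) : Decidable (Spec_encode_nrz_i data out) := by unfold Spec_encode_nrz_i; infer_instance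

-- ===== CLAIM (what is proved, stated in full; the proofs are below) =====
def Claim_equal_encode_nrz_i : Prop := ∀ (data : String), Dom_encode_nrz_i data → Spec_encode_nrz_i data (encode_nrz_i data)

-- ===== LEMMAS AND PROOFS =====

-- loop invariant: A's `last` is the parity-level of B's running count
theorem pv_loop_eq (l : List Char) (acc : List Int) (c : Int) :
    (l.foldl
      (fun (st : List Int × Int) bit =>
        let last := if bit = '1' then st.2 * (-1) else st.2
        (st.1 ++ [last], last))
      (acc, if c % 2 = 1 then 1 else -1)).1
    = acc ++ (pvPrefixCounts l c).map (fun c => if c % 2 = 1 then 1 else -1) := by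
  induction l generalizing acc c with
  | nil => simp [pvPrefixCounts]
  | cons bit rest ih =>
    simp only [List.foldl, pvPrefixCounts, List.map]
    by_cases h : bit = '1'
    · have hpar : (c + 1) % 2 = 1 ↔ ¬ (c % 2 = 1) := by omega
      by_cases hc : c % 2 = 1
      · have h2 : (c + 1) % 2 ≠ 1 := by omega
        simpa [h, hc, h2] using ih (acc ++ [(-1 : Int)]) (c + 1)
      · have h2 : (c + 1) % 2 = 1 := by omega
        simpa [h, hc, h2] using ih (acc ++ [(1 : Int)]) (c + 1)
    · by_cases hc : c % 2 = 1
      · simpa [h, hc] using ih (acc ++ [(1 : Int)]) c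
      · simpa [h, hc] using ih (acc ++ [(-1 : Int)]) c

-- ===== VERDICT (by name: the statement is the Claim_ definition above) =====
theorem encode_nrz_i_spec : Claim_equal_encode_nrz_i := by
  intro data _
  unfold Spec_encode_nrz_i encode_nrz_i encode_nrz_i_alt
  have h := pv_loop_eq data.toList [] 0
  simpa using h
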